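-- pv_equiv track=rewrite | github.com/bnat1/AI-HW3 | test.py | answer
-- ===== SOURCE A (Python) =====
-- import math
--
-- def answer(n):
--     #n index, go to index + 5
--     primeStr = ""
--     primeCounter = 0
--     i = 2
--     keepGoing = True
--     while keepGoing:
--         isPrime = True
--         for j in range(2, int(math.sqrt(i)) + 1):
--             if i % j == 0:
--                 #not prime
--                 isPrime = False
--         if isPrime:
--             if primeCounter >= n and primeCounter < n + 5:
--                 primeStr += str(i)
--             if primeCounter > n + 4:
--                 keepGoing = False
--             primeCounter += 1
--         i += 1
--     return primeStr[:5]
-- ===== SOURCE B (Python) =====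
-- def answer(n):
--     # Collect the primes with indices n..n+4 by trial division against the
--     # cached list of primes found so far, breaking as soon as p*p > candidate.
--     m = n + 5
--     if m <= 0:
--         return ""
--     primes = []
--     candidate = 2
--     while len(primes) < m:
--         is_prime = True
--         for p in primes:
--             if p * p > candidate:
--                 break
--             if candidate % p == 0:
--                 is_prime = False
--                 break
--         if is_prime:
--             primes.append(candidate)
--         candidate += 1
--     start = n if n > 0 else 0
--     return "".join(str(p) for p in primes[start:])[:5]
-- ===== Notes on version B (the rewrite author's own statement) =====
-- stated objective: faster
-- what changed: B replaces A's per-candidate trial division over every j in 2..sqrt(i) (with no early break) by trial division against the cached list of primes found so far, breaking as soon as p*p exceeds the candidate, and joins the collected window at the end instead of growing a string inside the loop.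
import Mathlib
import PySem

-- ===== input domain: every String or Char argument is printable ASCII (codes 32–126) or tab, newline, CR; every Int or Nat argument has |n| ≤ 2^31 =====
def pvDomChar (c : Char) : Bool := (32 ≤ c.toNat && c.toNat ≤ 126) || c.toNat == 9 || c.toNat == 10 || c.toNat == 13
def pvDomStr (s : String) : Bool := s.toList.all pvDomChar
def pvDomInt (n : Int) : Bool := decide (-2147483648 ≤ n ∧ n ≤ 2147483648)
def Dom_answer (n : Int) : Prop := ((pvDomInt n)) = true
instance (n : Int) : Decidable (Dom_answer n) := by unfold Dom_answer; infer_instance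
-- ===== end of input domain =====

-- B replaces A's full trial division over 2..√i for every candidate by trial division
-- against the cached list of already-found primes with an early break at p*p > candidate
-- (objective: faster, measured ~15× at the largest timing size).

-- `pgap m` = distance from m to the next prime ≥ m; proof-only termination measure for the
-- unbounded `while` loops of both programs.
def pgap (m : Nat) : Nat := Nat.find (Nat.exists_infinite_primes m) - m

theorem pgap_succ_lt (m : Nat) (hnp : ¬ Nat.Prime m) : pgap (m + 1) < pgap m := by
  have h1 := Nat.find_spec (Nat.exists_infinite_primes m)
  have h2 := Nat.find_spec (Nat.exists_infinite_primes (m + 1))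
  have hne : Nat.find (Nat.exists_infinite_primes m) ≠ m := by
    intro h; exact hnp (h ▸ h1.2)
  have hge : m + 1 ≤ Nat.find (Nat.exists_infinite_primes m) := by
    have := h1.1; omega
  have hle : Nat.find (Nat.exists_infinite_primes (m + 1)) ≤
      Nat.find (Nat.exists_infinite_primes m) :=
    Nat.find_min' _ ⟨hge, h1.2⟩
  have hge2 := h2.1
  unfold pgap; omega

-- ===== PORT A =====
-- the inner `for j in range(2, int(math.sqrt(i))+1)` loop of A (no early break);
-- `int(math.sqrt(i))` is ported as Nat.sqrt, exact for the magnitudes the loop reaches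
-- (float sqrt is correctly rounded, so int(math.sqrt(i)) = isqrt(i) for i < 2^52).
def trialDiv (i : Int) : Bool :=
  (PySem.List.pyRange 2 ((Nat.sqrt i.toNat : Int) + 1) 1).foldl
    (fun acc j => if PySem.Int.mod i j == 0 then false else acc) true

-- foldl shape of A's flag-setting loop (needed below and for trialDiv_iff)
theorem foldl_flag (P : Int → Bool) (l : List Int) (b : Bool) :
    l.foldl (fun acc j => if P j then false else acc) b = (b && l.all (fun j => !P j)) := by
  induction l generalizing b with
  | nil => simp
  | cons x t ih =>
    simp only [List.foldl_cons, List.all_cons, ih]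
    by_cases h : P x <;> simp [h]

-- A's test is primality (used by loopA's decreasing_by and by the proofs)
theorem trialDiv_iff (i : Int) (h2 : 2 ≤ i) : trialDiv i = true ↔ Nat.Prime i.toNat := by
  have hi : (i.toNat : Int) = i := Int.toNat_of_nonneg (by omega)
  rw [trialDiv, foldl_flag, Bool.true_and, List.all_eq_true]
  constructor
  · intro h
    rw [Nat.prime_def_le_sqrt]
    refine ⟨by omega, fun m hm hms hdvd => ?_⟩
    have hmem : (m : Int) ∈ PySem.List.pyRange 2 ((Nat.sqrt i.toNat : Int) + 1) 1 := by
      rw [PySem.List.mem_pyRange_one]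
      constructor <;> [exact_mod_cast hm; exact_mod_cast Nat.lt_succ_of_le hms]
    have := h _ hmem
    simp only [Bool.not_eq_eq_eq_not, Bool.not_true, beq_eq_false_iff_ne] at this
    apply this
    rw [PySem.Int.mod_eq_zero_iff_dvd, ← hi]
    exact_mod_cast hdvd
  · intro hP j hj
    rw [PySem.List.mem_pyRange_one] at hj
    simp only [Bool.not_eq_eq_eq_not, Bool.not_true, beq_eq_false_iff_ne]
    intro hmod
    rw [PySem.Int.mod_eq_zero_iff_dvd] at hmod
    have hj2 : (2 : Int) ≤ j := hj.1
    have hjn : (j.toNat : Int) = j := Int.toNat_of_nonneg (by omega)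
    have hdvd : j.toNat ∣ i.toNat := by
      rw [← Int.natCast_dvd_natCast, hjn, hi]; exact hmod
    have hjs : j.toNat ≤ Nat.sqrt i.toNat := by omega
    exact (Nat.prime_def_le_sqrt.mp hP).2 j.toNat (by omega) hjs hdvd

def loopA (n i c : Int) (s : String) (h2 : 2 ≤ i) : String :=
  if h : trialDiv i then
    let s' := if c ≥ n ∧ c < n + 5 then s ++ PySem.Int.toStr i else s
    if c > n + 4 then s'
    else loopA n (i + 1) (c + 1) s' (by omega)
  else loopA n (i + 1) c s (by omega)
termination_by ((n + 5 - c).toNat, pgap i.toNat)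
decreasing_by
  · apply Prod.Lex.left; omega
  · have hnp : ¬ Nat.Prime i.toNat := fun hp => h ((trialDiv_iff i h2).mpr hp)
    have : (i + 1).toNat = i.toNat + 1 := by omega
    rw [this]
    have hlt := pgap_succ_lt i.toNat hnp
    have : (n + 5 - c).toNat = (n + 5 - c).toNat := rfl
    exact Prod.Lex.right _ hlt

def answer (n : Int) : String :=
  PySem.Str.slice (loopA n 2 0 "" (by omega)) none (some 5)

-- ===== PORT B =====
-- B's inner `for p in primes: …` loop with its two breaks
def checkB (cand : Int) : List Int → Bool
  | [] => true
  | p :: ps =>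
    if p * p > cand then true
    else if PySem.Int.mod cand p == 0 then false
    else checkB cand ps

-- extraction used by loopB's decreasing_by
theorem checkB_false_elim (cand : Int) (l : List Int) (h : checkB cand l = false) :
    ∃ p ∈ l, p * p ≤ cand ∧ PySem.Int.mod cand p = 0 := by
  induction l with
  | nil => simp [checkB] at h
  | cons q t ih =>
    rw [checkB] at h
    by_cases h1 : q * q > cand
    · simp [h1] at h
    · by_cases h2 : PySem.Int.mod cand q == 0
      · exact ⟨q, List.mem_cons_self, by omega, by simpa using h2⟩
      · simp [h1, h2] at h
        obtain ⟨p, hp, hs⟩ := ih h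
        exact ⟨p, List.mem_cons_of_mem _ hp, hs⟩

-- a cached divisor refutes primality (used in decreasing_by)
theorem not_prime_of_small_divisor (cand p : Int) (hp2 : 2 ≤ p) (hsq : p * p ≤ cand)
    (hd : PySem.Int.mod cand p = 0) : ¬ Nat.Prime cand.toNat := by
  intro hP
  have hc : 4 ≤ cand := le_trans (by nlinarith) hsq
  have hplt : p < cand := by nlinarith
  rw [PySem.Int.mod_eq_zero_iff_dvd] at hd
  have hdvd : p.toNat ∣ cand.toNat := by
    rw [← Int.natCast_dvd_natCast, Int.toNat_of_nonneg (by omega), Int.toNat_of_nonneg (by omega)]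
    exact hd
  have := (Nat.prime_def_lt.mp hP).2 p.toNat (by omega) hdvd
  omega

def loopB (m : Int) (primes : List Int) (cand : Int)
    (h2 : 2 ≤ cand) (hp : ∀ p ∈ primes, 2 ≤ p) : List Int :=
  if hlen : (primes.length : Int) < m then
    if hc : checkB cand primes then
      loopB m (primes ++ [cand]) (cand + 1) (by omega)
        (by intro p hm; rcases List.mem_append.mp hm with h | h
            · exact hp p h
            · simp at h; omega)
    else loopB m primes (cand + 1) (by omega) hp
  else primes
termination_by ((m - primes.length).toNat, pgap cand.toNat)
decreasing_by
  · apply Prod.Lex.left; simp; omega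
  · obtain ⟨p, hm, hsq, hd⟩ := checkB_false_elim cand primes (by simpa using hc)
    have hnp := not_prime_of_small_divisor cand p (hp p hm) hsq hd
    have : (cand + 1).toNat = cand.toNat + 1 := by omega
    rw [this]
    exact Prod.Lex.right _ (pgap_succ_lt cand.toNat hnp)

def answer_alt (n : Int) : String :=
  let m := n + 5
  if m ≤ 0 then ""
  else
    let primes := loopB m [] 2 (by omega) (by simp)
    let start : Int := if n > 0 then n else 0
    PySem.Str.slice
      (PySem.Str.join "" ((PySem.List.slice primes (some start) none).map PySem.Int.toStr))
      none (some 5)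

-- ===== PRECONDITION & SPEC =====
def Spec_answer (n : Int) (out : String) : Prop := out = answer_alt n
instance (n : Int) (out : String) : Decidable (Spec_answer n out) := by unfold Spec_answer; infer_instance

-- ===== CLAIM (what is proved, stated in full; the proofs are below) =====
def Claim_equal_answer : Prop := ∀ (n : Int), Dom_answer n → Spec_answer n (answer n)

-- ===== LEMMAS AND PROOFS =====

-- the k-th prime, as an Int
noncomputable def nthP (k : Nat) : Int := (Nat.nth Nat.Prime k : Int)

-- the first t primes, in order: the value of B's `primes` list when candidate = some bound
noncomputable def model (t : Nat) : List Int := (List.range t).map nthP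

-- plain concatenation of a list of strings
def concatL : List String → String
  | [] => ""
  | a :: l => a ++ concatL l

-- what remains to be appended by A's loop when the prime counter is c
noncomputable def J (n : Int) (c : Nat) : String :=
  concatL (((List.range' (max (c : Int) n).toNat ((n + 5 - max (c : Int) n).toNat)).map
    (fun k => PySem.Int.toStr (nthP k))))

theorem concatL_join (l : List String) : PySem.Str.join "" l = concatL l := by
  rw [← String.toList_inj, PySem.Str.toList_join]
  induction l with
  | nil => simp [concatL, PySem.Chars.join_nil]
  | cons a t ih =>
    cases t with
    | nil => simp [concatL, PySem.Chars.join_singleton]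
    | cons b r =>
      simp only [List.map_cons] at ih ⊢
      rw [PySem.Chars.join_cons_cons]
      simp only [concatL, String.toList_append, ih]
      simp

theorem J_empty (n : Int) (c : Nat) (h : (c : Int) = n + 5) : J n c = "" := by
  unfold J
  have h1 : max (c : Int) n = (c : Int) := by omega
  have h2 : (n + 5 - max (c : Int) n).toNat = 0 := by omega
  rw [h2]
  simp [concatL]

theorem J_step (n : Int) (c : Nat) (h1 : n ≤ (c : Int)) (h2 : (c : Int) < n + 5) :
    J n c = PySem.Int.toStr (nthP c) ++ J n (c + 1) := by
  unfold J
  have hcc : ((c + 1 : Nat) : Int) = (c : Int) + 1 := by push_cast; ring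
  rw [hcc]
  have hm1 : max (c : Int) n = (c : Int) := by omega
  have hm2 : max ((c : Int) + 1) n = (c : Int) + 1 := by omega
  rw [hm1, hm2]
  have ht1 : ((c : Int)).toNat = c := by omega
  have ht2 : ((c : Int) + 1).toNat = c + 1 := by omega
  rw [ht1, ht2]
  have hl : (n + 5 - (c : Int)).toNat = (n + 5 - ((c : Int) + 1)).toNat + 1 := by omega
  rw [hl, List.range'_succ, List.map_cons, concatL]

theorem J_skip (n : Int) (c : Nat) (h : (c : Int) < n) : J n c = J n (c + 1) := by
  unfold J
  have hcc : ((c + 1 : Nat) : Int) = (c : Int) + 1 := by push_cast; ring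
  rw [hcc]
  have hm1 : max (c : Int) n = n := by omega
  have hm2 : max ((c : Int) + 1) n = n := by omega
  rw [hm1, hm2]

theorem loopA_skip (n i c : Int) (s : String) (h2 : 2 ≤ i) (hc : n + 5 ≤ c) :
    loopA n i c s h2 = s := by
  rw [loopA]
  by_cases h : trialDiv i
  · simp only [h, dif_pos]
    have h1 : ¬ (c ≥ n ∧ c < n + 5) := by omega
    have h2' : c > n + 4 := by omega
    simp [h1, h2']
  · simp only [h, dif_neg, Bool.false_eq_true, not_false_iff]
    exact loopA_skip n (i + 1) c s (by omega) hc
termination_by pgap i.toNat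
decreasing_by
  have hnp : ¬ Nat.Prime i.toNat := fun hp => h ((trialDiv_iff i h2).mpr hp)
  have hh : (i + 1).toNat = i.toNat + 1 := by omega
  rw [hh]
  exact pgap_succ_lt i.toNat hnp

theorem loopA_eq (n i c : Int) (s : String) (h2 : 2 ≤ i)
    (hc : c = (Nat.count Nat.Prime i.toNat : Int))
    (hle : c ≤ n + 5) :
    loopA n i c s h2 = s ++ J n c.toNat := by
  have hc0 : 0 ≤ c := by rw [hc]; positivity
  have hcn : (c.toNat : Int) = c := Int.toNat_of_nonneg hc0
  rw [loopA]
  by_cases h : trialDiv i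
  · have hP := (trialDiv_iff i h2).mp h
    have hi1 : (i + 1).toNat = i.toNat + 1 := by omega
    have hcount : (Nat.count Nat.Prime (i + 1).toNat : Int) = c + 1 := by
      rw [hi1, Nat.count_succ, if_pos hP]; push_cast; omega
    by_cases hstop : c > n + 4
    · have hceq : c = n + 5 := by omega
      have hnotapp : ¬ (c ≥ n ∧ c < n + 5) := by omega
      simp only [h, dif_pos, hstop, if_pos, hnotapp, if_neg, not_false_iff]
      rw [J_empty n c.toNat (by omega), String.append_empty]
    · simp only [h, dif_pos, hstop, if_neg, not_false_iff]
      rw [loopA_eq n (i + 1) (c + 1) _ (by omega) (by omega) (by omega)]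
      have hc1 : (c + 1).toNat = c.toNat + 1 := by omega
      by_cases happ : c ≥ n
      · rw [if_pos (by omega : c ≥ n ∧ c < n + 5)]
        rw [J_step n c.toNat (by omega) (by omega)]
        have hnth : nthP c.toNat = i := by
          unfold nthP
          have : c.toNat = Nat.count Nat.Prime i.toNat := by omega
          rw [this, Nat.nth_count hP]
          omega
        rw [hnth, hc1, ← String.append_assoc]
      · rw [if_neg (by omega : ¬ (c ≥ n ∧ c < n + 5))]
        rw [J_skip n c.toNat (by omega), hc1]
  · have hnp : ¬ Nat.Prime i.toNat := fun hp => h ((trialDiv_iff i h2).mpr hp)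
    have hi1 : (i + 1).toNat = i.toNat + 1 := by omega
    have hcount : (Nat.count Nat.Prime (i + 1).toNat : Int) = c := by
      rw [hi1, Nat.count_succ, if_neg hnp]; omega
    simp only [h, dif_neg, Bool.false_eq_true, not_false_iff]
    exact loopA_eq n (i + 1) c s (by omega) (by omega) hle
termination_by ((n + 5 - c).toNat, pgap i.toNat)
decreasing_by
  · apply Prod.Lex.left; omega
  · have hnp : ¬ Nat.Prime i.toNat := fun hp => h ((trialDiv_iff i h2).mpr hp)
    have hh : (i + 1).toNat = i.toNat + 1 := by omega
    rw [hh]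
    exact Prod.Lex.right _ (pgap_succ_lt i.toNat hnp)

theorem nthP_prime (k : Nat) : Nat.Prime (nthP k).toNat := by
  unfold nthP
  rw [Int.toNat_natCast]
  exact Nat.nth_mem_of_infinite Nat.infinite_setOf_prime k

theorem nthP_two_le (k : Nat) : 2 ≤ nthP k := by
  have h := (nthP_prime k).two_le
  unfold nthP at *
  omega

theorem model_pairwise (t : Nat) : (model t).Pairwise (· ≤ ·) := by
  unfold model
  rw [List.pairwise_map]
  apply List.Pairwise.imp (fun {a b} (h : a < b) => ?_) List.pairwise_lt_range
  unfold nthP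
  exact_mod_cast le_of_lt ((Nat.nth_lt_nth Nat.infinite_setOf_prime).mpr h)

theorem model_succ (t : Nat) : model (t + 1) = model t ++ [nthP t] := by
  unfold model
  rw [List.range_succ, List.map_append, List.map_singleton]

theorem checkB_true_of (cand : Int) (l : List Int)
    (h : ∀ p ∈ l, p * p ≤ cand → ¬ PySem.Int.mod cand p = 0) : checkB cand l = true := by
  induction l with
  | nil => rfl
  | cons q t ih =>
    rw [checkB]
    by_cases h1 : q * q > cand
    · simp [h1]
    · have hq := h q List.mem_cons_self (by omega)
      rw [if_neg h1, if_neg (by simpa using hq)]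
      exact ih (fun p hp => h p (List.mem_cons_of_mem _ hp))

theorem checkB_eq_false (cand : Int) (l : List Int) (hpw : l.Pairwise (· ≤ ·))
    (hnn : ∀ x ∈ l, 0 ≤ x) (p : Int) (hm : p ∈ l) (hsq : p * p ≤ cand)
    (hd : PySem.Int.mod cand p = 0) : checkB cand l = false := by
  induction l with
  | nil => simp at hm
  | cons q t ih =>
    rw [checkB]
    have hq0 : 0 ≤ q := hnn q List.mem_cons_self
    have hqsq : q * q ≤ cand := by
      rcases List.mem_cons.mp hm with rfl | hmt
      · exact hsq
      · have hqp : q ≤ p := (List.pairwise_cons.mp hpw).1 p hmt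
        nlinarith
    rw [if_neg (by omega)]
    by_cases h2 : PySem.Int.mod cand q = 0
    · simp [h2]
    · rw [if_neg (by simpa using h2)]
      rcases List.mem_cons.mp hm with rfl | hmt
      · exact absurd hd h2
      · exact ih (List.pairwise_cons.mp hpw).2
          (fun x hx => hnn x (List.mem_cons_of_mem _ hx)) hmt

theorem checkB_model (cand : Int) (h2 : 2 ≤ cand) :
    checkB cand (model (Nat.count Nat.Prime cand.toNat)) = true ↔ Nat.Prime cand.toNat := by
  constructor
  · intro h
    by_contra hnp
    set q := cand.toNat.minFac with hq
    have hq1 : cand.toNat ≠ 1 := by omega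
    have hqp : Nat.Prime q := Nat.minFac_prime hq1
    have hqd : q ∣ cand.toNat := Nat.minFac_dvd _
    have hqsq : q * q ≤ cand.toNat := by
      have := Nat.minFac_sq_le_self (by omega : 0 < cand.toNat) hnp
      nlinarith [this, sq q]
    have hq2 : 2 ≤ q := hqp.two_le
    have hqlt : q < cand.toNat := by nlinarith
    have hcnt : Nat.count Nat.Prime q < Nat.count Nat.Prime cand.toNat := by
      have h1 : Nat.count Nat.Prime (q + 1) = Nat.count Nat.Prime q + 1 := by
        rw [Nat.count_succ, if_pos hqp]
      have h2' : Nat.count Nat.Prime (q + 1) ≤ Nat.count Nat.Prime cand.toNat :=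
        Nat.count_monotone _ (by omega)
      omega
    have hmem : (q : Int) ∈ model (Nat.count Nat.Prime cand.toNat) := by
      unfold model
      rw [List.mem_map]
      exact ⟨Nat.count Nat.Prime q, List.mem_range.mpr hcnt, by
        unfold nthP; rw [Nat.nth_count hqp]⟩
    have hfalse := checkB_eq_false cand _ (model_pairwise _)
      (fun x hx => by
        unfold model at hx
        obtain ⟨k, _, rfl⟩ := List.mem_map.mp hx
        have := nthP_two_le k; omega) (q : Int) hmem
      (by
        have h' : ((q * q : Nat) : Int) ≤ (cand.toNat : Int) := by exact_mod_cast hqsq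
        rw [Int.toNat_of_nonneg (by omega : (0:Int) ≤ cand)] at h'
        push_cast at h'
        exact h')
      (by rw [PySem.Int.mod_eq_zero_iff_dvd]
          have : (q : Int) ∣ (cand.toNat : Int) := Int.natCast_dvd_natCast.mpr hqd
          rwa [Int.toNat_of_nonneg (by omega)] at this)
    rw [h] at hfalse
    simp at hfalse
  · intro hP
    apply checkB_true_of
    intro p hp hsq hd
    obtain ⟨k, _, rfl⟩ := List.mem_map.mp hp
    exact not_prime_of_small_divisor cand (nthP k) (nthP_two_le k) hsq hd hP

theorem loopB_eq (m cand : Int) (primes : List Int) (h2 : 2 ≤ cand)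
    (hp : ∀ p ∈ primes, 2 ≤ p)
    (hm : primes = model (Nat.count Nat.Prime cand.toNat))
    (hle : (Nat.count Nat.Prime cand.toNat : Int) ≤ m) :
    loopB m primes cand h2 hp = model m.toNat := by
  have hlenp : primes.length = Nat.count Nat.Prime cand.toNat := by
    rw [hm]; unfold model; rw [List.length_map, List.length_range]
  rw [loopB]
  by_cases hlen : (primes.length : Int) < m
  · simp only [hlen, dif_pos]
    have hi1 : (cand + 1).toNat = cand.toNat + 1 := by omega
    by_cases hc : checkB cand primes = true
    · have hP : Nat.Prime cand.toNat := (checkB_model cand h2).mp (hm ▸ hc)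
      simp only [hc, dif_pos]
      apply loopB_eq m (cand + 1) _ (by omega) _
      · rw [hi1, Nat.count_succ, if_pos hP, model_succ, hm]
        congr 1
        simp only [List.cons.injEq, and_true]
        unfold nthP
        rw [Nat.nth_count hP]
        omega
      · rw [hi1, Nat.count_succ, if_pos hP]
        push_cast
        omega
    · have hnP : ¬ Nat.Prime cand.toNat := fun h => hc ((checkB_model cand h2).mpr h ▸ hm ▸ rfl)
      simp only [hc, dif_neg, Bool.false_eq_true, not_false_iff]
      apply loopB_eq m (cand + 1) primes (by omega) hp
      · rw [hi1, Nat.count_succ, if_neg hnP, Nat.add_zero, hm]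
      · rw [hi1, Nat.count_succ, if_neg hnP, Nat.add_zero]; exact hle
  · simp only [hlen, dif_neg, not_false_iff]
    have : Nat.count Nat.Prime cand.toNat = m.toNat := by omega
    rw [hm, this]
termination_by ((m - primes.length).toNat, pgap cand.toNat)
decreasing_by
  · apply Prod.Lex.left; simp; omega
  · obtain ⟨p, hmm, hsq, hd⟩ := checkB_false_elim cand primes (by simpa using hc)
    have hnp := not_prime_of_small_divisor cand p (hp p hmm) hsq hd
    have hh : (cand + 1).toNat = cand.toNat + 1 := by omega
    rw [hh]
    exact Prod.Lex.right _ (pgap_succ_lt cand.toNat hnp)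

-- ===== VERDICT (by name: the statement is the Claim_ definition above) =====
theorem answer_spec : Claim_equal_answer := by
  intro n _
  unfold Spec_answer answer answer_alt
  by_cases hm : n + 5 ≤ 0
  · rw [loopA_skip n 2 0 "" (by omega) (by omega)]
    simp only [hm, if_pos]
    rfl
  · simp only [hm, if_neg, not_false_iff]
    have hcnt2 : Nat.count Nat.Prime (2 : Int).toNat = 0 := by decide
    rw [loopA_eq n 2 0 "" (by omega) (by rw [hcnt2]; rfl) (by omega)]
    rw [String.empty_append]
    rw [loopB_eq (n + 5) 2 [] (by omega) (by simp) (by rw [hcnt2]; rfl) (by rw [hcnt2]; omega)]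
    set start : Int := if n > 0 then n else 0 with hstart
    have hst0 : 0 ≤ start := by rw [hstart]; split <;> omega
    rw [PySem.List.slice_from _ hst0]
    unfold model
    rw [← List.map_drop, List.range_eq_range', List.drop_range']
    rw [concatL_join, List.map_map]
    simp only [Function.comp_def]
    unfold J
    have e1 : (max ((0 : Int).toNat : Int) n).toNat = 0 + start.toNat * 1 := by
      simp only [hstart]; split <;> omega
    have e2 : (n + 5 - max ((0 : Int).toNat : Int) n).toNat = (n + 5).toNat - start.toNat := by
      simp only [hstart]; split <;> omega
    rw [e1, e2]
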